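-- pv_equiv track=rewrite | github.com/MrBrantCode/unitest_baseline | mut_generate/mist_train_taco/taco_16853/solution.py | calculate_max_profit
-- ===== SOURCE A (Python) =====
-- def calculate_max_profit(prices):
--     total_profit = 0
--     max_price = 0
--
--     # Traverse the prices array from the end to the beginning
--     for price in reversed(prices):
--         if price > max_price:
--             max_price = price
--         total_profit += max_price - price
--
--     return total_profit
-- ===== SOURCE B (Python) =====
-- def calculate_max_profit(prices):
--     # Pass 1: build suffix-maximum table (seeded at 0), suffix[i] = max(0, max(prices[i:]))
--     suffix = []
--     m = 0
--     for p in reversed(prices):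
--         m = max(m, p)
--         suffix.append(m)
--     suffix.reverse()
--     # Pass 2: aggregate
--     return sum(s - p for s, p in zip(suffix, prices))
-- ===== Notes on version B (the rewrite author's own statement) =====
-- stated objective: alternative
-- what changed: Replaces A's single fused reverse loop (running max and profit accumulated together) by two separate passes: first an explicit suffix-maximum table is built and reversed, then the profit is summed as suffix[i]-prices[i] over a zip.
import Mathlib
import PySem

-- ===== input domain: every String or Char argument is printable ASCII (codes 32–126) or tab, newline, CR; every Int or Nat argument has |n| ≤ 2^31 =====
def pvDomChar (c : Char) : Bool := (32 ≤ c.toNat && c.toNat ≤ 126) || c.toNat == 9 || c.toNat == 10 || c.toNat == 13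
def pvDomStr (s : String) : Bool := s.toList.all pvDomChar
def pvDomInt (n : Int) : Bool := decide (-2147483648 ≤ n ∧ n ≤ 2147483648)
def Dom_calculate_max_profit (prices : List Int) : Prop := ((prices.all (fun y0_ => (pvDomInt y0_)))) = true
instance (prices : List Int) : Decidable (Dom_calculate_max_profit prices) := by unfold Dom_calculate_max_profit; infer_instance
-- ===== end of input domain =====

-- B replaces A's single fused reverse loop by two passes: build an explicit suffix-maximum table, then sum suffix[i] - prices[i] (objective: alternative decomposition, same cost).

-- ===== PORT A =====
-- the fused loop: state (total_profit, max_price), traversing reversed(prices)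
def aFold : List Int → Int × Int → Int × Int
  | [], st => st
  | p :: ps, (t, m) =>
      let m' := if p > m then p else m
      aFold ps (t + (m' - p), m')

def calculate_max_profit (prices : List Int) : Int :=
  (aFold prices.reverse (0, 0)).1

-- ===== PORT B =====
-- pass 1 of Source B: running max over reversed(prices), collecting each value
def bBuild : List Int → Int → List Int
  | [], _ => []
  | p :: ps, m =>
      let m' := max m p
      m' :: bBuild ps m'

def calculate_max_profit_alt (prices : List Int) : Int :=
  let suffix := (bBuild prices.reverse 0).reverse
  ((suffix.zip prices).map (fun q => q.1 - q.2)).sum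

-- ===== PRECONDITION & SPEC =====
def Spec_calculate_max_profit (prices : List Int) (out : Int) : Prop := out = calculate_max_profit_alt prices
instance (prices : List Int) (out : Int) : Decidable (Spec_calculate_max_profit prices out) := by unfold Spec_calculate_max_profit; infer_instance

-- ===== CLAIM (what is proved, stated in full; the proofs are below) =====
def Claim_equal_calculate_max_profit : Prop := ∀ (prices : List Int), Dom_calculate_max_profit prices → Spec_calculate_max_profit prices (calculate_max_profit prices)

-- ===== LEMMAS AND PROOFS =====

theorem bBuild_length (l : List Int) (m : Int) : (bBuild l m).length = l.length := by
  induction l generalizing m with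
  | nil => rfl
  | cons p ps ih => simp [bBuild, ih]

-- A's fused loop equals B's build-then-sum on the same (reversed) traversal order
theorem aFold_eq_sum (l : List Int) (t m : Int) :
    (aFold l (t, m)).1 = t + (((bBuild l m).zip l).map (fun q => q.1 - q.2)).sum := by
  induction l generalizing t m with
  | nil => simp [aFold, bBuild]
  | cons p ps ih =>
    have hmax : (if p > m then p else m) = max m p := by
      rw [max_def]; split_ifs <;> omega
    simp only [aFold, bBuild, List.zip_cons_cons, List.map_cons, List.sum_cons, hmax]
    rw [ih]
    ring

-- summing x.1 - x.2 over a zip is invariant under reversing both lists (equal lengths)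
theorem sum_zip_reverse (l1 l2 : List Int) (h : l1.length = l2.length) :
    ((l1.reverse.zip l2.reverse).map (fun q : Int × Int => q.1 - q.2)).sum
      = ((l1.zip l2).map (fun q : Int × Int => q.1 - q.2)).sum := by
  induction l1 generalizing l2 with
  | nil =>
    cases l2 with
    | nil => rfl
    | cons y ys => simp at h
  | cons x xs ih =>
    cases l2 with
    | nil => simp at h
    | cons y ys =>
      simp only [List.length_cons, Nat.succ.injEq] at h
      have hz : (xs.reverse ++ [x]).zip (ys.reverse ++ [y])
          = xs.reverse.zip ys.reverse ++ [(x, y)] := by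
        rw [List.zip_append (by simp [h])]
        rfl
      simp only [List.reverse_cons, hz, List.map_append, List.sum_append,
        List.zip_cons_cons, List.map_cons, List.sum_cons, ih ys h]
      simp
      ring

-- ===== VERDICT (by name: the statement is the Claim_ definition above) =====
theorem calculate_max_profit_spec : Claim_equal_calculate_max_profit := by
  intro prices _
  unfold Spec_calculate_max_profit calculate_max_profit calculate_max_profit_alt
  rw [aFold_eq_sum, zero_add]
  have := sum_zip_reverse (bBuild prices.reverse 0) prices.reverse
    (by rw [bBuild_length])
  simp only [List.reverse_reverse] at this
  rw [this]
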